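-- pv_equiv track=rewrite | github.com/pvegdahl/AdventOfCode2021 | src/day11.py | reset_target_cells
-- ===== SOURCE A (Python) =====
-- from typing import List, Tuple, Set
--
-- def reset_target_cells(
--     matrix: List[List[int]], target_cells: Set[Tuple[int, int]]
-- ) -> List[List[int]]:
--     result = []
--     for i in range(len(matrix)):
--         new_row = []
--         for j in range(len(matrix[i])):
--             new_value = matrix[i][j]
--             if (i, j) in target_cells:
--                 new_value = 0
--             new_row.append(new_value)
--         result.append(new_row)
--     return result
-- ===== SOURCE B (Python) =====
-- def reset_target_cells(matrix, target_cells):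
--     result = [row[:] for row in matrix]
--     for i, j in target_cells:
--         if 0 <= i < len(result) and 0 <= j < len(result[i]):
--             result[i][j] = 0
--     return result
-- ===== Notes on version B (the rewrite author's own statement) =====
-- stated objective: faster
-- what changed: A scans every cell and hashes (i,j) into the target set per cell; B copies each row once with a slice and then writes 0 only at the in-bounds target coordinates, iterating the target set itself.
import Mathlib
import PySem

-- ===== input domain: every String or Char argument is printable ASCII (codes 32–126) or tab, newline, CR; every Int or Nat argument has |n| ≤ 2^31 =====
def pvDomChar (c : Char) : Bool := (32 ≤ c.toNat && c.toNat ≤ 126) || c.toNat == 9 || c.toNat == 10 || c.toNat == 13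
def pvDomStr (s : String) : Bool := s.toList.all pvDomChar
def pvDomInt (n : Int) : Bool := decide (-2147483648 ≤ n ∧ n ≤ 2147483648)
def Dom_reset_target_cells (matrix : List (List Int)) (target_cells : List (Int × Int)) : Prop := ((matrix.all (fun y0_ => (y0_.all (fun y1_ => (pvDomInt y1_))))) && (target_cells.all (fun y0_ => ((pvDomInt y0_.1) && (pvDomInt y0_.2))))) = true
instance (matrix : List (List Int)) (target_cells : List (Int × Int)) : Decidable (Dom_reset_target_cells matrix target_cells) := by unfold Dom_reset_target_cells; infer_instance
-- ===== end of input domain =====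

-- B copies the matrix once and then writes 0 at each in-bounds target coordinate (iterating the
-- target set itself), instead of A's per-cell membership test; objective: faster by a constant factor.

-- ===== PORT A =====
def reset_target_cells (matrix : List (List Int)) (target_cells : List (Int × Int)) : List (List Int) :=
  (PySem.List.pyRange 0 (matrix.length : Int) 1).foldl (fun result i =>
    let row := PySem.List.pyGetD matrix i []
    let new_row := (PySem.List.pyRange 0 (row.length : Int) 1).foldl (fun new_row j =>
      let nv := PySem.List.pyGetD row j 0
      let nv := if (i, j) ∈ target_cells then 0 else nv
      new_row ++ [nv]) ([] : List Int)
    result ++ [new_row]) []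

-- ===== PORT B =====
-- row[:] is slice row none none; the mutation result[i][j] = 0 is ported as the write-back
-- pySetD res i (pySetD res[i] j 0), exact since the guard puts both indices in range.
def reset_target_cells_alt (matrix : List (List Int)) (target_cells : List (Int × Int)) : List (List Int) :=
  let result := matrix.map (fun row => PySem.List.slice row none none)
  target_cells.foldl (fun res p =>
    if 0 ≤ p.1 ∧ p.1 < (res.length : Int) ∧ 0 ≤ p.2 ∧ p.2 < ((PySem.List.pyGetD res p.1 []).length : Int) then
      PySem.List.pySetD res p.1 (PySem.List.pySetD (PySem.List.pyGetD res p.1 []) p.2 0)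
    else res) result

-- ===== PRECONDITION & SPEC =====
def Spec_reset_target_cells (matrix : List (List Int)) (target_cells : List (Int × Int)) (out : List (List Int)) : Prop := out = reset_target_cells_alt matrix target_cells
instance (matrix : List (List Int)) (target_cells : List (Int × Int)) (out : List (List Int)) : Decidable (Spec_reset_target_cells matrix target_cells out) := by unfold Spec_reset_target_cells; infer_instance

-- ===== CLAIM (what is proved, stated in full; the proofs are below) =====
def Claim_equal_reset_target_cells : Prop := ∀ (matrix : List (List Int)) (target_cells : List (Int × Int)), Dom_reset_target_cells matrix target_cells → Spec_reset_target_cells matrix target_cells (reset_target_cells matrix target_cells)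

-- ===== LEMMAS AND PROOFS =====

/-- Common normal form of both programs: zero every listed cell (out-of-range targets are no-ops). -/
def pvZero (tc : List (Int × Int)) (m : List (List Int)) : List (List Int) :=
  m.mapIdx (fun i row => row.mapIdx (fun j v => if ((i : Int), (j : Int)) ∈ tc then 0 else v))

/-- B's loop body, named for the proofs (definitionally the lambda in the port). -/
def pvStep (res : List (List Int)) (p : Int × Int) : List (List Int) :=
  if 0 ≤ p.1 ∧ p.1 < (res.length : Int) ∧ 0 ≤ p.2 ∧ p.2 < ((PySem.List.pyGetD res p.1 []).length : Int) then
    PySem.List.pySetD res p.1 (PySem.List.pySetD (PySem.List.pyGetD res p.1 []) p.2 0)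
  else res

theorem foldl_snoc {α β : Type} (f : α → β) (l : List α) (init : List β) :
    l.foldl (fun acc x => acc ++ [f x]) init = init ++ l.map f := by
  induction l generalizing init <;> simp [*]

theorem pvA_eq_zero (matrix : List (List Int)) (tc : List (Int × Int)) :
    reset_target_cells matrix tc = pvZero tc matrix := by
  unfold reset_target_cells
  simp only [foldl_snoc, List.nil_append]
  apply List.ext_getElem
  · simp [pvZero, PySem.List.length_pyRange_one]
  · intro i h1 h2
    simp only [List.getElem_map, PySem.List.getElem_pyRange_one, zero_add, pvZero, List.getElem_mapIdx]
    have hi : i < matrix.length := by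
      simpa [PySem.List.length_pyRange_one] using h1
    rw [PySem.List.pyGetD_eq_getElem matrix [] (by positivity) (by exact_mod_cast hi)]
    simp only [Int.toNat_natCast]
    apply List.ext_getElem
    · simp [PySem.List.length_pyRange_one]
    · intro j hj1 hj2
      simp only [List.getElem_map, PySem.List.getElem_pyRange_one, zero_add, List.getElem_mapIdx]
      have hjm : j < matrix[i].length := by simpa using hj2
      rw [PySem.List.pyGetD_eq_getElem matrix[i] 0 (by positivity) (by exact_mod_cast hjm)]
      simp

theorem pvZero_nil (s : List (List Int)) : pvZero [] s = s := by
  apply List.ext_getElem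
  · simp [pvZero]
  · intro i h1 h2
    simp only [pvZero, List.getElem_mapIdx, List.not_mem_nil, if_false]
    apply List.ext_getElem <;> simp

theorem pvStep_of_guard (s : List (List Int)) (p : Int × Int)
    (h1 : 0 ≤ p.1) (h2 : p.1 < (s.length : Int)) (h3 : 0 ≤ p.2)
    (h4 : p.2 < ((PySem.List.pyGetD s p.1 []).length : Int)) :
    pvStep s p = s.set p.1.toNat ((s[p.1.toNat]'(by omega)).set p.2.toNat 0) := by
  have hrow : PySem.List.pyGetD s p.1 [] = s[p.1.toNat]'(by omega) :=
    PySem.List.pyGetD_eq_getElem s [] h1 h2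
  unfold pvStep
  rw [if_pos ⟨h1, h2, h3, h4⟩, PySem.List.pySetD_of_nonneg _ _ h1,
    PySem.List.pySetD_of_nonneg _ _ h3, hrow]

theorem pvStep_length (s : List (List Int)) (p : Int × Int) : (pvStep s p).length = s.length := by
  unfold pvStep; split_ifs <;> simp [PySem.List.length_pySetD]

theorem pvStep_row_length (s : List (List Int)) (p : Int × Int) (i : Nat)
    (hi : i < s.length) (hi' : i < (pvStep s p).length) :
    (pvStep s p)[i].length = s[i].length := by
  by_cases hg : 0 ≤ p.1 ∧ p.1 < (s.length : Int) ∧ 0 ≤ p.2 ∧ p.2 < ((PySem.List.pyGetD s p.1 []).length : Int)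
  · obtain ⟨h1, h2, h3, h4⟩ := hg
    simp only [pvStep_of_guard s p h1 h2 h3 h4, List.getElem_set]
    split_ifs with he
    · simp [he]
    · rfl
  · simp only [pvStep, if_neg hg]

theorem pvStep_getElem (s : List (List Int)) (p : Int × Int) (i j : Nat)
    (hi : i < s.length) (hj : j < s[i].length) (hi' : i < (pvStep s p).length)
    (hj' : j < (pvStep s p)[i].length) :
    (pvStep s p)[i][j] = if p = ((i : Int), (j : Int)) then 0 else s[i][j] := by
  by_cases hg : 0 ≤ p.1 ∧ p.1 < (s.length : Int) ∧ 0 ≤ p.2 ∧ p.2 < ((PySem.List.pyGetD s p.1 []).length : Int)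
  · obtain ⟨h1, h2, h3, h4⟩ := hg
    simp only [pvStep_of_guard s p h1 h2 h3 h4, List.getElem_set]
    by_cases hpi : p.1.toNat = i
    · simp only [hpi, if_true, List.getElem_set]
      by_cases hpj : p.2.toNat = j
      · have : p = ((i : Int), (j : Int)) := by
          obtain ⟨a, b⟩ := p; simp_all; omega
        simp [this]
      · have : p ≠ ((i : Int), (j : Int)) := by
          obtain ⟨a, b⟩ := p; simp_all; omega
        simp [hpj, this]
    · have : p ≠ ((i : Int), (j : Int)) := by
        obtain ⟨a, b⟩ := p; simp_all; omega
      simp [hpi, this]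
  · have hne : p ≠ ((i : Int), (j : Int)) := by
      intro h; subst h
      apply hg
      refine ⟨by positivity, by simp; exact_mod_cast hi, by positivity, ?_⟩
      rw [PySem.List.pyGetD_eq_getElem s [] (by positivity) (by simp; exact_mod_cast hi)]
      show ((j:Int) : Int) < _
      have : ((i:Int)).toNat = i := by omega
      simp only [this]
      exact_mod_cast hj
    simp only [pvStep, if_neg hg, hne, if_false]

theorem pvB_fold (tc : List (Int × Int)) (s : List (List Int)) :
    tc.foldl pvStep s = pvZero tc s := by
  induction tc generalizing s with
  | nil => simp [pvZero_nil]
  | cons p tc ih =>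
    rw [List.foldl_cons, ih]
    apply List.ext_getElem
    · simp [pvZero, pvStep_length]
    · intro i h1 h2
      have hi : i < s.length := by simpa [pvZero, pvStep_length] using h1
      have hsi : i < (pvStep s p).length := by simpa [pvStep_length] using hi
      simp only [pvZero, List.getElem_mapIdx]
      apply List.ext_getElem
      · simp [pvStep_row_length s p i hi hsi]
      · intro j hj1 hj2
        have hj : j < s[i].length := by simpa using hj2
        have hj' : j < (pvStep s p)[i].length := by
          simpa [pvStep_row_length s p i hi hsi] using hj
        simp only [List.getElem_mapIdx]
        rw [pvStep_getElem s p i j hi hj hsi hj']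
        by_cases hmem : ((i : Int), (j : Int)) ∈ tc
        · simp [hmem]
        · by_cases hp : p = ((i : Int), (j : Int)) <;> simp [hmem, hp, List.mem_cons, eq_comm]

theorem pvB_eq_zero (matrix : List (List Int)) (tc : List (Int × Int)) :
    reset_target_cells_alt matrix tc = pvZero tc matrix := by
  have hcopy : matrix.map (fun row => PySem.List.slice row none none) = matrix := by
    simp [PySem.List.slice_none_none]
  show List.foldl pvStep (matrix.map (fun row => PySem.List.slice row none none)) tc = pvZero tc matrix
  rw [hcopy]
  exact pvB_fold tc matrix

-- ===== VERDICT (by name: the statement is the Claim_ definition above) =====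
theorem reset_target_cells_spec : Claim_equal_reset_target_cells := by
  intro matrix tc _
  unfold Spec_reset_target_cells
  rw [pvA_eq_zero, pvB_eq_zero]
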